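-- pv_equiv track=rewrite | github.com/PapieMedgar/Testing3 | sales-sync-backend/team_lead_visit_details_export.py | extract_fields_from_flat
-- ===== SOURCE A (Python) =====
-- from typing import Any, Dict, List, Optional, Tuple
--
-- def extract_fields_from_flat(flat: Dict[str, str]) -> Tuple[str, str]:
--     """Return (goldrush_id, customer_full_name)."""
--     # Goldrush/Golfish candidates
--     gold_keys = [
--         "goldrush id",
--         "goldfish id",
--         "goldrushid",
--         "goldfishid",
--         "goldrush number",
--         "goldrush",
--         "customer id",
--         "id number",
--         "id_number",
--         "id",
--     ]
--     goldrush_id = ""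
--     for k in flat.keys():
--         for probe in gold_keys:
--             if probe in k:
--                 goldrush_id = flat.get(k, "").strip()
--                 if goldrush_id:
--                     break
--         if goldrush_id:
--             break
--
--     # Name fields
--     first_keys = [
--         "customername",
--         "customer name",
--         "first name",
--         "firstname",
--         "name",
--     ]
--     last_keys = [
--         "customer surname",
--         "surname",
--         "last name",
--         "lastname",
--     ]
--
--     first_name = ""
--     last_name = ""
--     full_name = ""
--
--     for k in flat.keys():
--         for probe in first_keys:
--             if probe in k:
--                 first_name = flat.get(k, "").strip()
--                 if first_name:
--                     break
--         if first_name: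
--             break
--
--     for k in flat.keys():
--         for probe in last_keys:
--             if probe in k:
--                 last_name = flat.get(k, "").strip()
--                 if last_name:
--                     break
--         if last_name:
--             break
--
--     if not (first_name and last_name):
--         # Try single-field full name fallbacks
--         full_keys = [
--             "customer full name",
--             "fullname",
--             "full name",
--             "client name",
--             "customer",
--         ]
--         for k in flat.keys():
--             for probe in full_keys:
--                 if probe in k:
--                     full_name = flat.get(k, "").strip()
--                     if full_name:
--                         break
--             if full_name:
--                 break
--
--     cust_name = (f"{first_name} {last_name}" if first_name or last_name else full_name).strip()
--     return goldrush_id, cust_name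
-- ===== SOURCE B (Python) =====
-- def extract_fields_from_flat(flat):
--     """Return (goldrush_id, customer_full_name) in one pass over the items."""
--     gold_keys = [
--         "goldrush id", "goldfish id", "goldrushid", "goldfishid",
--         "goldrush number", "goldrush", "customer id", "id number",
--         "id_number", "id",
--     ]
--     first_keys = ["customername", "customer name", "first name", "firstname", "name"]
--     last_keys = ["customer surname", "surname", "last name", "lastname"]
--     full_keys = ["customer full name", "fullname", "full name", "client name", "customer"]
--
--     goldrush_id = first_name = last_name = full_name = ""
--     for k, v in flat.items():
--         val = v.strip()
--         if not val:
--             continue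
--         if not goldrush_id and any(p in k for p in gold_keys):
--             goldrush_id = val
--         if not first_name and any(p in k for p in first_keys):
--             first_name = val
--         if not last_name and any(p in k for p in last_keys):
--             last_name = val
--         if not full_name and any(p in k for p in full_keys):
--             full_name = val
--
--     cust_name = (f"{first_name} {last_name}" if first_name or last_name else full_name).strip()
--     return goldrush_id, cust_name
-- ===== Notes on version B (the rewrite author's own statement) =====
-- stated objective: alternative
-- what changed: Replaces A's four separate break-on-hit scans over the dict keys (each with a nested probe loop) by a single pass over flat.items() that fills four independent first-hit accumulators, testing each probe list with any() only while its field is still empty.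
import Mathlib
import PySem

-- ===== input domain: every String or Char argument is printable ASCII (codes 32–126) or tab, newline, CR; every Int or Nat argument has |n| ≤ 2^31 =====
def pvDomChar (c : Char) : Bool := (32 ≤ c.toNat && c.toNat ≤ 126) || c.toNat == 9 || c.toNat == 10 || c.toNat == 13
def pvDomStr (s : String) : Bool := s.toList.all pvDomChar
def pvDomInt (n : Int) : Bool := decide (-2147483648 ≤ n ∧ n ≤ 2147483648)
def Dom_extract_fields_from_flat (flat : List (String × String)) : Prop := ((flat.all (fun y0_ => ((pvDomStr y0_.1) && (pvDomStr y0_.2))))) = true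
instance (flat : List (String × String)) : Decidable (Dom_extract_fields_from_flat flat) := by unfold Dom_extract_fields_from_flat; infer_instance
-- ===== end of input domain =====

-- One pass over the dict items with four independent accumulators instead of A's four
-- separate key scans; objective: alternative (same asymptotic cost, single traversal).


-- ===== PORT A =====
-- A's probe lists (defined inside the Python function; hoisted as constants)
def pvGoldKeysA : List String :=
  ["goldrush id", "goldfish id", "goldrushid", "goldfishid", "goldrush number",
   "goldrush", "customer id", "id number", "id_number", "id"]
def pvFirstKeysA : List String :=
  ["customername", "customer name", "first name", "firstname", "name"]
def pvLastKeysA : List String :=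
  ["customer surname", "surname", "last name", "lastname"]
def pvFullKeysA : List String :=
  ["customer full name", "fullname", "full name", "client name", "customer"]

-- inner loop 'for probe in probes: if probe in k: acc = flat.get(k,"").strip(); if acc: break'
def pvInnerA (d : PySem.Dict String String) (k : String) : List String → String → String
  | [], acc => acc
  | p :: ps, acc =>
    if PySem.Str.isIn p k then
      let a := PySem.Str.strip (d.getD k "")
      if a ≠ "" then a else pvInnerA d k ps a
    else pvInnerA d k ps acc

-- outer loop 'for k in flat.keys(): …; if acc: break'
def pvOuterA (d : PySem.Dict String String) (probes : List String) : List String → String → String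
  | [], acc => acc
  | k :: ks, acc =>
    let a := pvInnerA d k probes acc
    if a ≠ "" then a else pvOuterA d probes ks a

def extract_fields_from_flat (flat : List (String × String)) : String × String :=
  let d := PySem.Dict.ofList flat
  let goldrush_id := pvOuterA d pvGoldKeysA d.keys ""
  let first_name := pvOuterA d pvFirstKeysA d.keys ""
  let last_name := pvOuterA d pvLastKeysA d.keys ""
  let full_name :=
    if ¬ (first_name ≠ "" ∧ last_name ≠ "") then pvOuterA d pvFullKeysA d.keys "" else ""
  let cust_name := PySem.Str.strip
    (if first_name ≠ "" ∨ last_name ≠ "" then first_name ++ " " ++ last_name else full_name)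
  (goldrush_id, cust_name)

-- ===== PORT B =====
def pvGoldKeysB : List String :=
  ["goldrush id", "goldfish id", "goldrushid", "goldfishid", "goldrush number",
   "goldrush", "customer id", "id number", "id_number", "id"]
def pvFirstKeysB : List String :=
  ["customername", "customer name", "first name", "firstname", "name"]
def pvLastKeysB : List String :=
  ["customer surname", "surname", "last name", "lastname"]
def pvFullKeysB : List String :=
  ["customer full name", "fullname", "full name", "client name", "customer"]

-- 'any(p in k for p in probes)'
def pvAnyIn (probes : List String) (k : String) : Bool :=
  probes.any (fun p => PySem.Str.isIn p k)

-- one iteration of B's single loop over flat.items()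
def pvStepB (st : String × String × String × String) (kv : String × String) :
    String × String × String × String :=
  let val := PySem.Str.strip kv.2
  if val = "" then st
  else
    (if st.1 = "" ∧ pvAnyIn pvGoldKeysB kv.1 then val else st.1,
     if st.2.1 = "" ∧ pvAnyIn pvFirstKeysB kv.1 then val else st.2.1,
     if st.2.2.1 = "" ∧ pvAnyIn pvLastKeysB kv.1 then val else st.2.2.1,
     if st.2.2.2 = "" ∧ pvAnyIn pvFullKeysB kv.1 then val else st.2.2.2)

def extract_fields_from_flat_alt (flat : List (String × String)) : String × String :=
  let d := PySem.Dict.ofList flat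
  let st := d.items.foldl pvStepB ("", "", "", "")
  let cust_name := PySem.Str.strip
    (if st.2.1 ≠ "" ∨ st.2.2.1 ≠ "" then st.2.1 ++ " " ++ st.2.2.1 else st.2.2.2)
  (st.1, cust_name)

-- ===== PRECONDITION & SPEC =====
def Spec_extract_fields_from_flat (flat : List (String × String)) (out : String × String) : Prop := out = extract_fields_from_flat_alt flat
instance (flat : List (String × String)) (out : String × String) : Decidable (Spec_extract_fields_from_flat flat out) := by unfold Spec_extract_fields_from_flat; infer_instance

-- ===== CLAIM (what is proved, stated in full; the proofs are below) =====
def Claim_equal_extract_fields_from_flat : Prop := ∀ (flat : List (String × String)), Dom_extract_fields_from_flat flat → Spec_extract_fields_from_flat flat (extract_fields_from_flat flat)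

-- ===== LEMMAS AND PROOFS =====

-- canonical "first hit" fold over item pairs, one probe list at a time
def pvCanon (probes : List String) (l : List (String × String)) (acc : String) : String :=
  l.foldl (fun a kv =>
    if a = "" ∧ pvAnyIn probes kv.1 ∧ PySem.Str.strip kv.2 ≠ "" then PySem.Str.strip kv.2 else a) acc

lemma pvAnyIn_cons (p : String) (ps : List String) (k : String) :
    pvAnyIn (p :: ps) k = (PySem.Str.isIn p k || pvAnyIn ps k) := by
  simp [pvAnyIn]

lemma pvCanon_ne (probes : List String) (l : List (String × String)) (acc : String)
    (h : acc ≠ "") : pvCanon probes l acc = acc := by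
  induction l with
  | nil => rfl
  | cons kv t ih =>
    simp only [pvCanon, List.foldl_cons] at *
    rw [if_neg (by simp [h]), ih]

lemma pvInnerA_char (d : PySem.Dict String String) (k : String) (ps : List String) :
    pvInnerA d k ps "" =
      if pvAnyIn ps k ∧ PySem.Str.strip (d.getD k "") ≠ "" then PySem.Str.strip (d.getD k "") else "" := by
  induction ps with
  | nil => simp [pvInnerA, pvAnyIn]
  | cons p t ih =>
    rw [pvInnerA, pvAnyIn_cons]
    cases hp : PySem.Str.isIn p k with
    | true =>
      by_cases hv : PySem.Str.strip (d.getD k "") = ""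
      · simp [hv, ih]
      · simp [hv]
    | false =>
      simpa [hp] using ih

lemma pvOuterA_eq_canon (d : PySem.Dict String String) (probes : List String)
    (ks : List String) :
    pvOuterA d probes ks "" = pvCanon probes (ks.map (fun k => (k, d.getD k ""))) "" := by
  induction ks with
  | nil => rfl
  | cons k t ih =>
    simp only [pvOuterA, List.map_cons]
    rw [pvInnerA_char]
    by_cases hc : pvAnyIn probes k = true ∧ PySem.Str.strip (d.getD k "") ≠ ""
    · rw [if_pos hc, if_pos hc.2]
      have hstep : pvCanon probes ((k, d.getD k "") :: t.map (fun k => (k, d.getD k ""))) "" =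
          pvCanon probes (t.map (fun k => (k, d.getD k ""))) (PySem.Str.strip (d.getD k "")) := by
        simp only [pvCanon, List.foldl_cons]
        rw [if_pos (by exact ⟨by trivial, hc.1, hc.2⟩)]
      rw [hstep, pvCanon_ne _ _ _ hc.2]
    · rw [if_neg hc, if_neg (fun h => h rfl)]
      have hstep : pvCanon probes ((k, d.getD k "") :: t.map (fun k => (k, d.getD k ""))) "" =
          pvCanon probes (t.map (fun k => (k, d.getD k ""))) "" := by
        simp only [pvCanon, List.foldl_cons]
        rw [if_neg (fun h => hc ⟨h.2.1, h.2.2⟩)]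
      rw [hstep]
      exact ih

lemma pvFoldB_components (l : List (String × String)) (g f la u : String) :
    l.foldl pvStepB (g, f, la, u) =
      (pvCanon pvGoldKeysB l g, pvCanon pvFirstKeysB l f,
       pvCanon pvLastKeysB l la, pvCanon pvFullKeysB l u) := by
  induction l generalizing g f la u with
  | nil => rfl
  | cons kv t ih =>
    simp only [List.foldl_cons, pvStepB]
    by_cases hv : PySem.Str.strip kv.2 = ""
    · rw [if_pos hv, ih]
      simp only [pvCanon, List.foldl_cons, hv]
      simp
    · rw [if_neg hv, ih]
      simp only [pvCanon, List.foldl_cons, Prod.mk.injEq]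
      refine ⟨?_, ?_, ?_, ?_⟩ <;> (congr 1; simp [hv])

-- the four probe lists coincide
lemma pvKeys_eq : pvGoldKeysA = pvGoldKeysB ∧ pvFirstKeysA = pvFirstKeysB ∧
    pvLastKeysA = pvLastKeysB ∧ pvFullKeysA = pvFullKeysB := ⟨rfl, rfl, rfl, rfl⟩

-- ===== VERDICT (by name: the statement is the Claim_ definition above) =====
theorem extract_fields_from_flat_spec : Claim_equal_extract_fields_from_flat := by
  intro flat _
  unfold Spec_extract_fields_from_flat
  dsimp only [extract_fields_from_flat, extract_fields_from_flat_alt]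
  set d := PySem.Dict.ofList flat with hd
  have hitems : d.items = d.keys.map (fun k => (k, d.getD k "")) :=
    PySem.Dict.items_eq_map_keys d (PySem.Dict.nodup_keys_ofList flat) ""
  rw [hitems, pvFoldB_components]
  rw [pvKeys_eq.1, pvKeys_eq.2.1, pvKeys_eq.2.2.1, pvKeys_eq.2.2.2]
  rw [pvOuterA_eq_canon d pvGoldKeysB d.keys, pvOuterA_eq_canon d pvFirstKeysB d.keys,
      pvOuterA_eq_canon d pvLastKeysB d.keys, pvOuterA_eq_canon d pvFullKeysB d.keys]
  by_cases hfl : pvCanon pvFirstKeysB (d.keys.map (fun k => (k, d.getD k ""))) "" ≠ "" ∨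
      pvCanon pvLastKeysB (d.keys.map (fun k => (k, d.getD k ""))) "" ≠ ""
  · simp only [if_pos hfl]
  · rw [not_or, not_not, not_not] at hfl
    simp [hfl.1, hfl.2]
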